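-- pv_equiv track=rewrite | github.com/ayushi8795/Leetcode-Python | 3861-minimum-capacity-box/3861-minimum-capacity-box.py | minimumIndex
-- ===== SOURCE A (Python) =====
-- def minimumIndex(capacity: list[int], itemSize: int) -> int:
--     mincap = -1
--     indexReturn = -1
--
--     for index,cap in enumerate(capacity):
--         if cap >= itemSize:
--             if mincap == -1:
--                 mincap = cap
--                 indexReturn = index
--             elif mincap > cap :
--                 mincap = cap
--                 indexReturn = index
--     return indexReturn
-- ===== SOURCE B (Python) =====
-- def minimumIndex(capacity: list[int], itemSize: int) -> int:
--     for i in sorted(range(len(capacity)), key=lambda i: (capacity[i], i)):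
--         if capacity[i] >= itemSize:
--             return i
--     return -1
-- ===== Notes on version B (the rewrite author's own statement) =====
-- stated objective: alternative
-- what changed: Replaced A's single sentinel-tracking pass by a different algorithm: sort the indices by (capacity, index) and return the first index whose capacity meets the threshold, which also removes A's '-1 means unset' sentinel bug.
-- intended difference: When itemSize <= -1, some capacity equals -1, every qualifying capacity is >= -1 (so the true minimum is -1) and a qualifying element follows a -1, A's sentinel value -1 is confused with the tracked minimum and A returns a later index, while B returns the index of the first -1, the intended first minimal qualifying capacity. — e.g. on minimumIndex([-1, 5], -1): A returns 1, B returns 0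
import Mathlib
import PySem

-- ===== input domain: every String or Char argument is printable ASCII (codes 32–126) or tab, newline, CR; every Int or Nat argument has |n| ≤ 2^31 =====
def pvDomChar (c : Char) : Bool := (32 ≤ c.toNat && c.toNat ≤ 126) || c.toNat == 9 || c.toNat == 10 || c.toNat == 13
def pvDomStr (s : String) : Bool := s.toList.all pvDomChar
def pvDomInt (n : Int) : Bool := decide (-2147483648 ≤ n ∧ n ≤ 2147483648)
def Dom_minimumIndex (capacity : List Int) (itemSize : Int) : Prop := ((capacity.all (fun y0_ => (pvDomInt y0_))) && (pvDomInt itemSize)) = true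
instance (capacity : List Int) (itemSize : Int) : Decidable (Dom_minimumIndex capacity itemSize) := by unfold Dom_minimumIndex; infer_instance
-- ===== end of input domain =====

-- B replaces A's single sentinel-based min-tracking pass by a different algorithm:
-- sort the indices by (capacity, index) and return the first qualifying one
-- (objective: alternative); B intentionally differs from A on the sentinel-confusion
-- inputs described at D_minimumIndex below.

-- ===== PORT A =====
-- the body of A's for-loop: state (mincap, indexReturn), element (index, cap)
def pvAStep (itemSize : Int) (s : Int × Int) (p : Int × Int) : Int × Int :=
  if p.2 ≥ itemSize then
    if s.1 = -1 then (p.2, p.1)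
    else if s.1 > p.2 then (p.2, p.1)
    else s
  else s

def minimumIndex (capacity : List Int) (itemSize : Int) : Int :=
  ((PySem.List.enumerate capacity).foldl (pvAStep itemSize) (-1, -1)).2

-- ===== PORT B =====
-- the for-loop with early return over the sorted index list
def pvScan (capacity : List Int) (itemSize : Int) : List Int → Int
  | [] => -1
  | i :: rest =>
      if PySem.List.pyGetD capacity i 0 ≥ itemSize then i
      else pvScan capacity itemSize rest

def minimumIndex_alt (capacity : List Int) (itemSize : Int) : Int :=
  -- for i in sorted(range(len(capacity)), key=lambda i: (capacity[i], i)): …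
  pvScan capacity itemSize
    (PySem.List.sorted2 (PySem.List.pyRange 0 (capacity.length : Int) 1)
      (fun i => PySem.List.pyGetD capacity i 0) (fun i => i))

-- ===== PRECONDITION & SPEC =====
-- When itemSize ≤ -1, some capacity equals -1, every qualifying capacity is ≥ -1 (so the
-- true minimum is -1) and a qualifying element follows a -1, A confuses its sentinel -1
-- with the tracked minimum and returns a later index; B returns the index of the first -1,
-- the intended first minimal qualifying capacity.
def D_minimumIndex (capacity : List Int) (itemSize : Int) : Prop :=
  itemSize ≤ -1 ∧ (-1 : Int) ∈ capacity ∧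
  (∀ c ∈ capacity, itemSize ≤ c → -1 ≤ c) ∧
  (∃ i < capacity.length, ∃ j < capacity.length, i < j ∧ capacity[i]! = -1 ∧ itemSize ≤ capacity[j]!)

instance (capacity : List Int) (itemSize : Int) : Decidable (D_minimumIndex capacity itemSize) := by
  unfold D_minimumIndex; infer_instance

def Spec_minimumIndex (capacity : List Int) (itemSize : Int) (out : Int) : Prop :=
  ¬ D_minimumIndex capacity itemSize → out = minimumIndex_alt capacity itemSize
instance (capacity : List Int) (itemSize : Int) (out : Int) : Decidable (Spec_minimumIndex capacity itemSize out) := by unfold Spec_minimumIndex; infer_instance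

def pvDiffWitness_minimumIndex : List Int × Int := ([-1, 5], -1)
def pvDiffWitnessOut_minimumIndex : Int × Int := (1, 0)

-- ===== CLAIM (what is proved, stated in full; the proofs are below) =====
def Claim_unchanged_minimumIndex : Prop := ∀ (capacity : List Int) (itemSize : Int), Dom_minimumIndex capacity itemSize → Spec_minimumIndex capacity itemSize (minimumIndex capacity itemSize)
def Claim_changed_minimumIndex : Prop := Dom_minimumIndex (pvDiffWitness_minimumIndex.1) (pvDiffWitness_minimumIndex.2) ∧ D_minimumIndex (pvDiffWitness_minimumIndex.1) (pvDiffWitness_minimumIndex.2) ∧ minimumIndex (pvDiffWitness_minimumIndex.1) (pvDiffWitness_minimumIndex.2) = pvDiffWitnessOut_minimumIndex.1 ∧ minimumIndex_alt (pvDiffWitness_minimumIndex.1) (pvDiffWitness_minimumIndex.2) = pvDiffWitnessOut_minimumIndex.2 ∧ pvDiffWitnessOut_minimumIndex.1 ≠ pvDiffWitnessOut_minimumIndex.2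

def Claim_exact_minimumIndex : Prop := ∀ (capacity : List Int) (itemSize : Int), Dom_minimumIndex capacity itemSize → D_minimumIndex capacity itemSize → minimumIndex capacity itemSize ≠ minimumIndex_alt capacity itemSize

-- ===== LEMMAS AND PROOFS =====

-- proof-internal gadget: the running lex-min fold (min over qualifying (cap, idx) pairs)
def pvBStep (itemSize : Int) (b : Option (Int × Int)) (p : Int × Int) : Option (Int × Int) :=
  if p.2 ≥ itemSize then
    match b with
    | none => some (p.2, p.1)
    | some m =>
      if (decide (p.2 < m.1) || !decide (m.1 < p.2) && decide (p.1 < m.2)) = true then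
        some (p.2, p.1)
      else some m
  else b

-- the comparator sorted2 uses for key=lambda i: (capacity[i], i)
def pvLt (cap : List Int) (a b : Int) : Bool :=
  decide (PySem.List.pyGetD cap a 0 < PySem.List.pyGetD cap b 0) ||
    !decide (PySem.List.pyGetD cap b 0 < PySem.List.pyGetD cap a 0) && decide (a < b)

-- a Nat index qualifies
def pvQ (cap : List Int) (t : Int) (m : Nat) : Prop := m < cap.length ∧ t ≤ cap[m]!

-- ----- generic fold-with-invariant over enumerate -----
lemma pvEnumFold {σ : Type} (cap : List Int) (step : σ → Int × Int → σ) (P : Nat → σ → Prop)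
    (hstep : ∀ n s, n < cap.length → P n s → P (n+1) (step s ((n:Int), cap[n]!))) :
    ∀ (xs : List Int) (n : Nat) (s : σ), n ≤ cap.length → cap.drop n = xs → P n s →
      P cap.length (List.foldl step s (PySem.List.enumerate xs (n : Int))) := by
  intro xs
  induction xs with
  | nil =>
    intro n s hle hdrop h
    have : cap.length ≤ n := List.drop_eq_nil_iff.mp hdrop
    have hn : n = cap.length := le_antisymm hle this
    subst hn
    simpa [PySem.List.enumerate_nil] using h
  | cons c xs ih =>
    intro n s hle hdrop h
    have hn : n < cap.length := by
      by_contra hcon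
      rw [List.drop_eq_nil_iff.mpr (by omega)] at hdrop
      exact List.cons_ne_nil c xs hdrop.symm
    have hdec : cap.drop n = cap[n] :: cap.drop (n + 1) := List.drop_eq_getElem_cons hn
    rw [hdrop] at hdec
    have hc : c = cap[n]! := by
      rw [getElem!_pos cap n hn]
      exact (List.cons.injEq _ _ _ _ ▸ hdec).1
    have hxs : cap.drop (n + 1) = xs := ((List.cons.injEq _ _ _ _ ▸ hdec).2).symm
    rw [PySem.List.enumerate_cons, List.foldl_cons]
    have hstep' := hstep n s hn h
    rw [← hc] at hstep'
    have := ih (n + 1) _ (by omega) hxs hstep'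
    rwa [Nat.cast_add, Nat.cast_one] at this

-- ----- characterisation of the lex-min fold -----
def pvPB (cap : List Int) (t : Int) (n : Nat) (b : Option (Int × Int)) : Prop :=
  (b = none ∧ ∀ m : Nat, m < n → ¬ pvQ cap t m)
  ∨ (∃ j : Nat, j < n ∧ pvQ cap t j ∧ b = some (cap[j]!, (j : Int)) ∧
      ∀ m : Nat, m < n → pvQ cap t m → cap[j]! < cap[m]! ∨ (cap[j]! = cap[m]! ∧ j ≤ m))

lemma pvPB_step (cap : List Int) (t : Int) (n : Nat) (b : Option (Int × Int))
    (hn : n < cap.length) (h : pvPB cap t n b) :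
    pvPB cap t (n+1) (pvBStep t b ((n:Int), cap[n]!)) := by
  set c := cap[n]! with hc
  by_cases hq : c ≥ t
  · rcases h with ⟨rfl, hno⟩ | ⟨j, hjn, hjq, rfl, hmin⟩
    · have hb' : pvBStep t none ((n:Int), c) = some (c, (n:Int)) := by simp [pvBStep, hq]
      rw [hb']
      refine Or.inr ⟨n, by omega, ⟨hn, hq⟩, rfl, fun m hm hmq => ?_⟩
      rcases Nat.lt_succ_iff_lt_or_eq.mp hm with hm' | rfl
      · exact absurd hmq (hno m hm')
      · omega
    · set w := cap[j]! with hw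
      by_cases hlt : c < w
      · have hb' : pvBStep t (some (w, (j:Int))) ((n:Int), c) = some (c, (n:Int)) := by
          simp only [pvBStep]; rw [if_pos hq, if_pos (by simp; omega)]
        rw [hb']
        refine Or.inr ⟨n, by omega, ⟨hn, hq⟩, rfl, fun m hm hmq => ?_⟩
        rcases Nat.lt_succ_iff_lt_or_eq.mp hm with hm' | rfl
        · have := hmin m hm' hmq; omega
        · omega
      · have hb' : pvBStep t (some (w, (j:Int))) ((n:Int), c) = some (w, (j:Int)) := by
          simp only [pvBStep]
          rw [if_pos hq, if_neg (by simp; omega)]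
        rw [hb']
        refine Or.inr ⟨j, by omega, hjq, rfl, fun m hm hmq => ?_⟩
        rcases Nat.lt_succ_iff_lt_or_eq.mp hm with hm' | rfl
        · exact hmin m hm' hmq
        · omega
  · have hb' : pvBStep t b ((n:Int), c) = b := by cases b <;> simp [pvBStep, hq]
    rw [hb']
    rcases h with ⟨rfl, hno⟩ | ⟨j, hjn, hjq, rfl, hmin⟩
    · refine Or.inl ⟨rfl, fun m hm => ?_⟩
      rcases Nat.lt_succ_iff_lt_or_eq.mp hm with hm' | rfl
      · exact hno m hm'
      · exact fun hq' => hq hq'.2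
    · refine Or.inr ⟨j, by omega, hjq, rfl, fun m hm hmq => ?_⟩
      rcases Nat.lt_succ_iff_lt_or_eq.mp hm with hm' | rfl
      · exact hmin m hm' hmq
      · exact absurd hmq.2 hq

lemma pvBfold_char (cap : List Int) (t : Int) :
    pvPB cap t cap.length ((PySem.List.enumerate cap).foldl (pvBStep t) none) := by
  have h0 : pvPB cap t 0 none := Or.inl ⟨rfl, by omega⟩
  have := pvEnumFold cap (pvBStep t) (pvPB cap t) (pvPB_step cap t) cap 0 none
    (Nat.zero_le _) List.drop_zero h0
  rwa [Nat.cast_zero] at this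

-- ----- the sorted index list: permutation and strict pairwise order -----
lemma pv_insertBy_perm {α : Type} (before : α → α → Bool) (x : α) (ys : List α) :
    (PySem.List.insertBy before x ys).Perm (x :: ys) := by
  induction ys with
  | nil => simp [PySem.List.insertBy]
  | cons y ys ih =>
    by_cases h : before x y
    · simp [PySem.List.insertBy, h]
    · simp only [PySem.List.insertBy, h, Bool.false_eq_true, if_false]
      exact (ih.cons y).trans (List.Perm.swap x y ys)

lemma pv_fold_insertBy_perm {α : Type} (before : α → α → Bool) :
    ∀ (xs acc : List α),
      (List.foldl (fun a x => PySem.List.insertBy before x a) acc xs).Perm (acc ++ xs) := by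
  intro xs
  induction xs with
  | nil => intro acc; simp
  | cons x xs ih =>
    intro acc
    rw [List.foldl_cons]
    refine (ih _).trans ?_
    refine (((pv_insertBy_perm before x acc).append_right xs).trans ?_)
    exact (List.perm_middle).symm

lemma pvLt_trans (cap : List Int) {a b c : Int}
    (h1 : pvLt cap a b = true) (h2 : pvLt cap b c = true) : pvLt cap a c = true := by
  simp [pvLt] at h1 h2 ⊢; omega

lemma pvLt_total (cap : List Int) {a b : Int} (h : a ≠ b) :
    pvLt cap a b = true ∨ pvLt cap b a = true := by
  simp [pvLt]; omega

lemma pv_insertBy_pairwise (cap : List Int) (x : Int) (ys : List Int)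
    (h : ys.Pairwise (fun a b => pvLt cap a b = true)) (hx : x ∉ ys) :
    (PySem.List.insertBy (pvLt cap) x ys).Pairwise (fun a b => pvLt cap a b = true) := by
  induction ys with
  | nil => simp [PySem.List.insertBy]
  | cons y ys ih =>
    rw [List.pairwise_cons] at h
    obtain ⟨hy, hys⟩ := h
    have hxy : x ≠ y := by intro he; exact hx (he ▸ List.mem_cons_self)
    have hxys : x ∉ ys := fun hm => hx (List.mem_cons_of_mem y hm)
    by_cases hb : pvLt cap x y = true
    · have hrw : PySem.List.insertBy (pvLt cap) x (y :: ys) = x :: y :: ys := by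
        simp [PySem.List.insertBy, hb]
      rw [hrw, List.pairwise_cons]
      refine ⟨fun z hz => ?_, List.pairwise_cons.mpr ⟨hy, hys⟩⟩
      rcases List.mem_cons.mp hz with rfl | hz'
      · exact hb
      · exact pvLt_trans cap hb (hy z hz')
    · have hrw : PySem.List.insertBy (pvLt cap) x (y :: ys) = y :: PySem.List.insertBy (pvLt cap) x ys := by
        simp [PySem.List.insertBy, hb]
      rw [hrw, List.pairwise_cons]
      refine ⟨fun z hz => ?_, ih hys hxys⟩
      rcases (PySem.List.mem_insertBy _ _ _ _).mp hz with rfl | hz'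
      · rcases pvLt_total cap hxy with h' | h'
        · exact absurd h' hb
        · exact h'
      · exact hy z hz'

lemma pv_fold_insertBy_pairwise (cap : List Int) :
    ∀ (xs acc : List Int), acc.Pairwise (fun a b => pvLt cap a b = true) → acc.Nodup →
      (∀ x ∈ xs, x ∉ acc) → xs.Nodup →
      (List.foldl (fun a x => PySem.List.insertBy (pvLt cap) x a) acc xs).Pairwise
        (fun a b => pvLt cap a b = true) := by
  intro xs
  induction xs with
  | nil => intro acc hp _ _ _; simpa using hp
  | cons x xs ih =>
    intro acc hp hnd hdisj hxs
    rw [List.nodup_cons] at hxs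
    rw [List.foldl_cons]
    have hxacc : x ∉ acc := hdisj x List.mem_cons_self
    refine ih _ (pv_insertBy_pairwise cap x acc hp hxacc) ?_ ?_ hxs.2
    · exact (pv_insertBy_perm (pvLt cap) x acc).nodup_iff.mpr (List.nodup_cons.mpr ⟨hxacc, hnd⟩)
    · intro y hy hmem
      rcases (PySem.List.mem_insertBy _ _ _ _).mp hmem with rfl | hy'
      · exact hxs.1 hy
      · exact hdisj y (List.mem_cons_of_mem x hy) hy'

-- sorted2 with these keys IS the insertBy fold with comparator pvLt
lemma pv_alt_unfold (cap : List Int) (t : Int) :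
    minimumIndex_alt cap t =
      pvScan cap t ((PySem.List.pyRange 0 (cap.length : Int) 1).foldl
        (fun a x => PySem.List.insertBy (pvLt cap) x a) []) := rfl

-- ----- characterisation of the scan over a strictly lex-sorted list -----
lemma pvScan_char (cap : List Int) (t : Int) :
    ∀ L : List Int, L.Pairwise (fun a b => pvLt cap a b = true) →
      (pvScan cap t L = -1 ∧ ∀ i ∈ L, ¬ t ≤ PySem.List.pyGetD cap i 0)
      ∨ (∃ r, pvScan cap t L = r ∧ r ∈ L ∧ t ≤ PySem.List.pyGetD cap r 0 ∧
          ∀ i ∈ L, t ≤ PySem.List.pyGetD cap i 0 → r = i ∨ pvLt cap r i = true) := by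
  intro L
  induction L with
  | nil => intro _; exact Or.inl ⟨rfl, by simp⟩
  | cons i L ih =>
    intro hp
    rw [List.pairwise_cons] at hp
    obtain ⟨hi, hL⟩ := hp
    by_cases hq : PySem.List.pyGetD cap i 0 ≥ t
    · refine Or.inr ⟨i, by simp [pvScan, hq], List.mem_cons_self, hq, fun j hj _ => ?_⟩
      rcases List.mem_cons.mp hj with rfl | hj'
      · exact Or.inl rfl
      · exact Or.inr (hi j hj')
    · rcases ih hL with ⟨he, hno⟩ | ⟨r, he, hr, hrq, hmin⟩
      · refine Or.inl ⟨by simp [pvScan, hq, he], fun j hj => ?_⟩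
        rcases List.mem_cons.mp hj with rfl | hj'
        · exact hq
        · exact hno j hj'
      · refine Or.inr ⟨r, by simp [pvScan, hq, he], List.mem_cons_of_mem i hr, hrq,
          fun j hj hjq => ?_⟩
        rcases List.mem_cons.mp hj with rfl | hj'
        · exact absurd hjq hq
        · exact hmin j hj' hjq

-- glue: B's value from the lex-min fold's value
lemma pv_alt_of_bfold (cap : List Int) (t : Int) :
    (((PySem.List.enumerate cap).foldl (pvBStep t) none = none →
        minimumIndex_alt cap t = -1)
      ∧ ∀ v ix, (PySem.List.enumerate cap).foldl (pvBStep t) none = some (v, ix) →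
        minimumIndex_alt cap t = ix) := by
  have hchar := pvBfold_char cap t
  set L := (PySem.List.pyRange 0 (cap.length : Int) 1).foldl
      (fun a x => PySem.List.insertBy (pvLt cap) x a) [] with hLdef
  have hperm : L.Perm (PySem.List.pyRange 0 (cap.length : Int) 1) := by
    simpa using pv_fold_insertBy_perm (pvLt cap) (PySem.List.pyRange 0 (cap.length : Int) 1) []
  have hmemL : ∀ i : Int, i ∈ L ↔ 0 ≤ i ∧ i < (cap.length : Int) := by
    intro i
    rw [hperm.mem_iff, PySem.List.mem_pyRange_one]
  have hpair : L.Pairwise (fun a b => pvLt cap a b = true) :=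
    pv_fold_insertBy_pairwise cap (PySem.List.pyRange 0 (cap.length : Int) 1) []
      (List.Pairwise.nil) (List.nodup_nil) (by simp) (PySem.List.nodup_pyRange_one 0 _)
  have hgetd : ∀ i : Int, 0 ≤ i → i < (cap.length : Int) →
      PySem.List.pyGetD cap i 0 = cap[i.toNat]! := by
    intro i h0 hl
    rw [PySem.List.pyGetD_eq_getElem cap 0 h0 hl, getElem!_pos cap i.toNat (by omega)]
  constructor
  · intro hb
    rw [hb] at hchar
    rcases hchar with ⟨-, hno⟩ | ⟨j, _, _, hj, -⟩
    · rcases pvScan_char cap t L hpair with ⟨he, -⟩ | ⟨r, he, hr, hrq, -⟩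
      · rw [pv_alt_unfold]; exact he
      · exfalso
        have hrr := (hmemL r).mp hr
        have hQ : pvQ cap t r.toNat := ⟨by omega, by rw [← hgetd r hrr.1 hrr.2]; exact hrq⟩
        exact hno r.toNat (by omega) hQ
    · exact absurd hj (by simp)
  · intro v ix hb
    rw [hb] at hchar
    rcases hchar with ⟨hn, -⟩ | ⟨j, hjl, hjq, hj, hmin⟩
    · exact absurd hn (by simp)
    · have hvix : v = cap[j]! ∧ ix = (j : Int) := by
        have := hj.symm
        injection this with h
        rw [Prod.mk.injEq] at h
        exact ⟨h.1.symm, h.2.symm⟩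
      rcases pvScan_char cap t L hpair with ⟨-, hno⟩ | ⟨r, he, hr, hrq, hminS⟩
      · exfalso
        have hjmem : (j : Int) ∈ L := (hmemL (j : Int)).mpr ⟨by omega, by exact_mod_cast hjq.1⟩
        refine hno (j : Int) hjmem ?_
        rw [hgetd (j : Int) (by omega) (by exact_mod_cast hjq.1)]
        simpa using hjq.2
      · -- r = j by lex antisymmetry between the two minimality facts
        have hrr := (hmemL r).mp hr
        have hQr : pvQ cap t r.toNat := ⟨by omega, by rw [← hgetd r hrr.1 hrr.2]; exact hrq⟩
        have h1 := hmin r.toNat (by omega) hQr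
        have hjmem : (j : Int) ∈ L := (hmemL (j : Int)).mpr ⟨by omega, by exact_mod_cast hjq.1⟩
        have hjget : t ≤ PySem.List.pyGetD cap (j : Int) 0 := by
          rw [hgetd (j : Int) (by omega) (by exact_mod_cast hjq.1)]
          simpa using hjq.2
        have h2 := hminS (j : Int) hjmem hjget
        have hrj : r = (j : Int) := by
          rcases h2 with h2 | h2
          · exact h2
          · simp only [pvLt] at h2
            rw [hgetd r hrr.1 hrr.2,
              hgetd (j : Int) (by omega) (by exact_mod_cast hjq.1)] at h2
            simp only [Int.toNat_natCast, Bool.or_eq_true, Bool.and_eq_true,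
              Bool.not_eq_true', decide_eq_true_eq, decide_eq_false_iff_not] at h2
            have hrcast : ((r.toNat : Int)) = r := Int.toNat_of_nonneg hrr.1
            omega
        rw [pv_alt_unfold, he, hrj, hvix.2]

-- ----- invariant relating A's loop state to the lex-min fold (unchanged analysis) -----
-- states: unset / synced running min / synced on a real -1 candidate / desynced
def pvInv (cap : List Int) (t : Int) (n : Nat) (a : Int × Int) (b : Option (Int × Int)) : Prop :=
  (a = (-1, -1) ∧ b = none ∧ ∀ m : Nat, m < n → m < cap.length → ¬ t ≤ cap[m]!)
  ∨ (b = some a ∧ a.1 ≠ -1 ∧ a.2 < (n : Int) ∧ t ≤ a.1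
      ∧ (∃ m : Nat, m < n ∧ m < cap.length ∧ cap[m]! = a.1)
      ∧ (∀ m : Nat, m < n → m < cap.length → t ≤ cap[m]! → a.1 ≤ cap[m]!))
  ∨ (t ≤ -1 ∧ ∃ k : Nat, k < cap.length ∧ k < n ∧ cap[k]! = -1 ∧ a = (-1, (k : Int)) ∧ b = some (-1, (k : Int))
      ∧ (∀ i j : Nat, i < j → j < n → j < cap.length → cap[i]! = -1 → ¬ t ≤ cap[j]!)
      ∧ (∀ m : Nat, m < n → m < cap.length → t ≤ cap[m]! → -1 ≤ cap[m]!))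
  ∨ (t ≤ -1 ∧ (-1 : Int) ≤ a.1 ∧ (∃ p, b = some (-1, p) ∧ p < (n : Int) ∧ a.2 ≠ p)
      ∧ (∀ m : Nat, m < n → m < cap.length → t ≤ cap[m]! → -1 ≤ cap[m]!)
      ∧ ∃ i < cap.length, ∃ j < cap.length, i < j ∧ cap[i]! = -1 ∧ t ≤ cap[j]!)

lemma pvInv_step (cap : List Int) (t : Int) (n : Nat) (a : Int × Int) (b : Option (Int × Int))
    (hn : n < cap.length) (h : pvInv cap t n a b) :
    pvInv cap t (n + 1) (pvAStep t a ((n : Int), cap[n]!)) (pvBStep t b ((n : Int), cap[n]!)) := by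
  set c := cap[n]! with hc
  by_cases hq : c ≥ t
  case neg =>
    have ha' : pvAStep t a ((n : Int), c) = a := by simp [pvAStep, hq]
    have hb' : pvBStep t b ((n : Int), c) = b := by cases b <;> simp [pvBStep, hq]
    rw [ha', hb']
    rcases h with ⟨h1, h2, h3⟩ | ⟨h1, h2, h3, h4, ⟨m0, hm0⟩, h6⟩ |
      ⟨ht, k, hk1, hk2, hk3, ha, hb2, hnv, hge⟩ | ⟨ht, hga, ⟨p, hb2, hpn, hane⟩, hge, hw⟩
    · refine Or.inl ⟨h1, h2, fun m hm hml => ?_⟩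
      rcases Nat.lt_succ_iff_lt_or_eq.mp hm with hm' | rfl
      · exact h3 m hm' hml
      · exact hq
    · refine Or.inr (Or.inl ⟨h1, h2, by push_cast; omega, h4, ⟨m0, by omega, hm0.2⟩, fun m hm hml hmq => ?_⟩)
      rcases Nat.lt_succ_iff_lt_or_eq.mp hm with hm' | rfl
      · exact h6 m hm' hml hmq
      · exact absurd hmq hq
    · refine Or.inr (Or.inr (Or.inl ⟨ht, k, hk1, by omega, hk3, ha, hb2, fun i j hij hj hjl hi => ?_, fun m hm hml hmq => ?_⟩))
      · rcases Nat.lt_succ_iff_lt_or_eq.mp hj with hj' | rfl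
        · exact hnv i j hij hj' hjl hi
        · exact hq
      · rcases Nat.lt_succ_iff_lt_or_eq.mp hm with hm' | rfl
        · exact hge m hm' hml hmq
        · exact absurd hmq hq
    · refine Or.inr (Or.inr (Or.inr ⟨ht, hga, ⟨p, hb2, by push_cast; omega, hane⟩, fun m hm hml hmq => ?_, hw⟩))
      rcases Nat.lt_succ_iff_lt_or_eq.mp hm with hm' | rfl
      · exact hge m hm' hml hmq
      · exact absurd hmq hq
  case pos =>
  rcases h with ⟨h1, h2, h3⟩ | ⟨h1, h2, h3, h4, ⟨m0, hm01, hm02, hm03⟩, h6⟩ |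
    ⟨ht, k, hk1, hk2, hk3, ha, hb2, hnv, hge⟩ | ⟨ht, hga, ⟨p, hb2, hpn, hane⟩, hge, hw⟩
  · -- U: unset
    subst h1; subst h2
    have ha' : pvAStep t (-1, -1) ((n : Int), c) = (c, (n : Int)) := by simp [pvAStep, hq]
    have hb' : pvBStep t none ((n : Int), c) = some (c, (n : Int)) := by simp [pvBStep, hq]
    rw [ha', hb']
    by_cases hcm : c = -1
    · refine Or.inr (Or.inr (Or.inl ⟨by omega, n, hn, by omega, by omega, by rw [hcm],
        by rw [hcm], fun i j hij hj hjl hi => ?_, fun m hm hml hmq => ?_⟩))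
      · exact absurd (by rw [hi]; omega) (h3 i (by omega) (by omega))
      · rcases Nat.lt_succ_iff_lt_or_eq.mp hm with hm' | rfl
        · exact absurd hmq (h3 m hm' hml)
        · omega
    · refine Or.inr (Or.inl ⟨rfl, hcm, by omega, hq, ⟨n, by omega, hn, rfl⟩, fun m hm hml hmq => ?_⟩)
      rcases Nat.lt_succ_iff_lt_or_eq.mp hm with hm' | rfl
      · exact absurd hmq (h3 m hm' hml)
      · omega
  · -- S: synced running min, a.1 ≠ -1
    obtain ⟨mc, ix⟩ := a
    simp only at h2 h3 h4 hm03 h6 ⊢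
    subst h1
    by_cases hgt : mc > c
    · have ha' : pvAStep t (mc, ix) ((n : Int), c) = (c, (n : Int)) := by
        simp [pvAStep, hq, h2, hgt]
      have hb' : pvBStep t (some (mc, ix)) ((n : Int), c) = some (c, (n : Int)) := by
        simp only [pvBStep]; rw [if_pos hq, if_pos (by simp; omega)]
      rw [ha', hb']
      by_cases hcm : c = -1
      · refine Or.inr (Or.inr (Or.inl ⟨by omega, n, hn, by omega, by omega, by rw [hcm],
          by rw [hcm], fun i j hij hj hjl hi => ?_, fun m hm hml hmq => ?_⟩))
        · have hiq : t ≤ cap[i]! := by rw [hi]; omega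
          have := h6 i (by omega) (by omega) hiq
          rw [hi] at this; omega
        · rcases Nat.lt_succ_iff_lt_or_eq.mp hm with hm' | rfl
          · have := h6 m hm' hml hmq; omega
          · omega
      · refine Or.inr (Or.inl ⟨rfl, hcm, by omega, hq, ⟨n, by omega, hn, rfl⟩, fun m hm hml hmq => ?_⟩)
        rcases Nat.lt_succ_iff_lt_or_eq.mp hm with hm' | rfl
        · have := h6 m hm' hml hmq; omega
        · omega
    · have ha' : pvAStep t (mc, ix) ((n : Int), c) = (mc, ix) := by
        simp [pvAStep, hq, h2, hgt]
      have hb' : pvBStep t (some (mc, ix)) ((n : Int), c) = some (mc, ix) := by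
        simp only [pvBStep]; rw [if_pos hq, if_neg (by simp; omega)]
      rw [ha', hb']
      refine Or.inr (Or.inl ⟨rfl, h2, by push_cast; omega, h4, ⟨m0, by omega, hm02, hm03⟩, fun m hm hml hmq => ?_⟩)
      rcases Nat.lt_succ_iff_lt_or_eq.mp hm with hm' | rfl
      · exact h6 m hm' hml hmq
      · omega
  · -- D0: both hold the first -1 candidate at index k
    subst ha; subst hb2
    have ha' : pvAStep t (-1, (k : Int)) ((n : Int), c) = (c, (n : Int)) := by simp [pvAStep, hq]
    rw [ha']
    by_cases hlt2 : c < -1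
    · have hb' : pvBStep t (some (-1, (k : Int))) ((n : Int), c) = some (c, (n : Int)) := by
        simp only [pvBStep]; rw [if_pos hq, if_pos (by simp; omega)]
      rw [hb']
      refine Or.inr (Or.inl ⟨rfl, by omega, by omega, hq, ⟨n, by omega, hn, rfl⟩, fun m hm hml hmq => ?_⟩)
      rcases Nat.lt_succ_iff_lt_or_eq.mp hm with hm' | rfl
      · have := hge m hm' hml hmq; omega
      · omega
    · have hb' : pvBStep t (some (-1, (k : Int))) ((n : Int), c) = some (-1, (k : Int)) := by
        simp only [pvBStep]; rw [if_pos hq, if_neg (by simp; omega)]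
      rw [hb']
      refine Or.inr (Or.inr (Or.inr ⟨ht, by simp; omega, ⟨(k : Int), rfl, by push_cast; omega, by push_cast; omega⟩,
        fun m hm hml hmq => ?_, k, hk1, n, hn, hk2, hk3, hq⟩))
      rcases Nat.lt_succ_iff_lt_or_eq.mp hm with hm' | rfl
      · exact hge m hm' hml hmq
      · omega
  · -- D1: desynced
    obtain ⟨mc, ix⟩ := a
    simp only at hga hane ⊢
    subst hb2
    by_cases hlt2 : c < -1
    · have ha' : pvAStep t (mc, ix) ((n : Int), c) = (c, (n : Int)) := by
        by_cases hm : mc = -1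
        · simp [pvAStep, hq, hm]
        · simp [pvAStep, hq, hm, show mc > c by omega]
      have hb' : pvBStep t (some (-1, p)) ((n : Int), c) = some (c, (n : Int)) := by
        simp only [pvBStep]; rw [if_pos hq, if_pos (by simp; omega)]
      rw [ha', hb']
      refine Or.inr (Or.inl ⟨rfl, by omega, by omega, hq, ⟨n, by omega, hn, rfl⟩, fun m hm hml hmq => ?_⟩)
      rcases Nat.lt_succ_iff_lt_or_eq.mp hm with hm' | rfl
      · have := hge m hm' hml hmq; omega
      · omega
    · have hb' : pvBStep t (some (-1, p)) ((n : Int), c) = some (-1, p) := by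
        simp only [pvBStep]; rw [if_pos hq, if_neg (by simp; omega)]
      rw [hb']
      have ha' : (-1 ≤ (pvAStep t (mc, ix) ((n : Int), c)).1) ∧
          ((pvAStep t (mc, ix) ((n : Int), c)).2 = ix ∨ (pvAStep t (mc, ix) ((n : Int), c)).2 = (n : Int)) := by
        simp only [pvAStep]
        rw [if_pos hq]
        by_cases hm : mc = -1
        · rw [if_pos hm]; exact ⟨by omega, Or.inr rfl⟩
        · rw [if_neg hm]
          by_cases hgt : mc > c
          · rw [if_pos hgt]; exact ⟨by omega, Or.inr rfl⟩
          · rw [if_neg hgt]; exact ⟨by omega, Or.inl rfl⟩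
      refine Or.inr (Or.inr (Or.inr ⟨ht, ha'.1, ⟨p, rfl, by push_cast; omega, ?_⟩,
        fun m hm hml hmq => ?_, hw⟩))
      · rcases ha'.2 with he | he <;> rw [he] <;> omega
      · rcases Nat.lt_succ_iff_lt_or_eq.mp hm with hm' | rfl
        · exact hge m hm' hml hmq
        · omega

lemma pvInv_fold (cap : List Int) (t : Int) :
    pvInv cap t cap.length
      (List.foldl (pvAStep t) (-1, -1) (PySem.List.enumerate cap))
      (List.foldl (pvBStep t) none (PySem.List.enumerate cap)) := by
  have h0 : pvInv cap t 0 (-1, -1) none := Or.inl ⟨rfl, rfl, by omega⟩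
  have := pvEnumFold cap
    (fun s : (Int × Int) × Option (Int × Int) => fun p => (pvAStep t s.1 p, pvBStep t s.2 p))
    (fun n s => pvInv cap t n s.1 s.2)
    (fun n s hn h => pvInv_step cap t n s.1 s.2 hn h)
    cap 0 ((-1, -1), none) (Nat.zero_le _) List.drop_zero h0
  rw [Nat.cast_zero] at this
  have hsplit : ∀ (xs : List (Int × Int)) (s : (Int × Int) × Option (Int × Int)),
      List.foldl (fun s : (Int × Int) × Option (Int × Int) => fun p => (pvAStep t s.1 p, pvBStep t s.2 p)) s xs
        = (List.foldl (pvAStep t) s.1 xs, List.foldl (pvBStep t) s.2 xs) := by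
    intro xs
    induction xs with
    | nil => intro s; rfl
    | cons p xs ih => intro s; simp [List.foldl_cons, ih]
  rw [hsplit] at this
  exact this

-- ===== VERDICT (by name: the statement is the Claim_ definition above) =====
theorem minimumIndex_spec : Claim_unchanged_minimumIndex := by
  unfold Claim_unchanged_minimumIndex Spec_minimumIndex
  intro cap t _ hd
  have hfold := pvInv_fold cap t
  have halt := pv_alt_of_bfold cap t
  unfold minimumIndex
  rcases hfold with ⟨ha, hb, -⟩ | ⟨hb, -, -, -, -, -⟩ | ⟨-, k, -, -, -, ha, hb, -, -⟩ | ⟨h1, -, ⟨p, hb, -, -⟩, -, hw⟩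
  · rw [ha, halt.1 hb]
  · obtain ⟨v, ix, hvix⟩ : ∃ v ix,
        List.foldl (pvAStep t) (-1, -1) (PySem.List.enumerate cap) = (v, ix) := ⟨_, _, rfl⟩
    rw [hvix]
    exact (halt.2 v ix (hvix ▸ hb)).symm
  · rw [ha]
    exact (halt.2 (-1) (k : Int) hb).symm
  · exfalso
    apply hd
    have hchar := pvBfold_char cap t
    rw [hb] at hchar
    rcases hchar with ⟨hn, -⟩ | ⟨j, hjl, hjq, hj, hmin⟩
    · exact absurd hn (by simp)
    · have hjv : cap[j]! = -1 := by
        have := hj.symm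
        injection this with h
        rw [Prod.mk.injEq] at h
        exact h.1
      refine ⟨h1, ?_, ?_, hw⟩
      · rw [← hjv, getElem!_pos cap j hjq.1]
        exact List.getElem_mem _
      · intro d hdm hdq
        obtain ⟨m, hm, hdm'⟩ := List.getElem_of_mem hdm
        have hQ : pvQ cap t m := ⟨hm, by rw [getElem!_pos cap m hm, hdm']; exact hdq⟩
        have := hmin m hQ.1 hQ
        rw [getElem!_pos cap m hm, hdm'] at this
        omega

theorem minimumIndex_changed : Claim_changed_minimumIndex := by
  unfold Claim_changed_minimumIndex; decide

theorem minimumIndex_tight : Claim_exact_minimumIndex := by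
  unfold Claim_exact_minimumIndex
  intro cap t _ hD
  obtain ⟨hd1, hd2, hd3, hd4⟩ := hD
  have hfold := pvInv_fold cap t
  have halt := pv_alt_of_bfold cap t
  obtain ⟨i0, hi0, hci0⟩ := List.getElem_of_mem hd2
  rcases hfold with ⟨-, -, h3⟩ | ⟨hb, hne, -, hqa, ⟨m0, hm01, hm02, hm03⟩, h6⟩ |
    ⟨-, k, -, -, -, -, -, hnv, -⟩ | ⟨-, -, ⟨p, hb, -, hane⟩, -, -⟩
  · exact absurd (by rw [getElem!_pos cap i0 hi0, hci0]; omega) (h3 i0 hi0 hi0)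
  · have hm03' : cap[m0] = (List.foldl (pvAStep t) (-1, -1) (PySem.List.enumerate cap)).1 := by
      rw [← getElem!_pos cap m0 hm02]; exact hm03
    have h1 : (-1 : Int) ≤ (List.foldl (pvAStep t) (-1, -1) (PySem.List.enumerate cap)).1 := by
      rw [← hm03']
      exact hd3 _ (List.getElem_mem _) (by rw [hm03']; exact hqa)
    have h2 := h6 i0 hi0 hi0 (by rw [getElem!_pos cap i0 hi0, hci0]; omega)
    rw [getElem!_pos cap i0 hi0, hci0] at h2
    exact absurd (by omega) hne
  · obtain ⟨i, hi, j, hj, hij, hci, hcj⟩ := hd4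
    exact absurd hcj (hnv i j hij hj hj hci)
  · intro heq
    unfold minimumIndex at heq
    rw [halt.2 (-1) p hb] at heq
    exact hane heq
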